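-- pv_equiv track=rewrite | github.com/andrewfurman/PlanDocs | documents/create_sections_using_flags.py | split_section_with_continuity
-- ===== SOURCE A (Python) =====
-- def split_section_with_continuity(section, min_pages, max_pages):
--     """Split large sections while maintaining content continuity."""
--     split_sections = []
--     current_split = []
--
--     for idx, page in enumerate(section):
--         current_split.append(page)
--         if len(current_split) >= max_pages:
--             if idx + 1 < len(section) and section[idx + 1]['content_continued_from_previous_page']:
--                 continue
--             else:
--                 split_sections.append(current_split)
--                 current_split = []
--
--     if current_split:
--         split_sections.append(current_split)
--
--     return split_sections
-- ===== SOURCE B (Python) =====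
-- def split_section_with_continuity(section, min_pages, max_pages):
--     """Split large sections while maintaining content continuity."""
--     n = len(section)
--     chunks = []
--     i = 0
--     while i < n:
--         j = i
--         while j + 1 < n and not (j - i + 1 >= max_pages
--                                  and not section[j + 1]['content_continued_from_previous_page']):
--             j += 1
--         chunks.append(section[i:j + 1])
--         i = j + 1
--     return chunks
-- ===== Notes on version B (the rewrite author's own statement) =====
-- stated objective: alternative
-- what changed: Replaces the append-and-flush accumulator loop by a two-pointer chunk extractor: an outer while keeps a start index i, an inner scan advances j to the chunk's cut point, and each chunk is produced as the slice section[i:j+1]; there is no pending accumulator and no post-loop flush.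
import Mathlib
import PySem

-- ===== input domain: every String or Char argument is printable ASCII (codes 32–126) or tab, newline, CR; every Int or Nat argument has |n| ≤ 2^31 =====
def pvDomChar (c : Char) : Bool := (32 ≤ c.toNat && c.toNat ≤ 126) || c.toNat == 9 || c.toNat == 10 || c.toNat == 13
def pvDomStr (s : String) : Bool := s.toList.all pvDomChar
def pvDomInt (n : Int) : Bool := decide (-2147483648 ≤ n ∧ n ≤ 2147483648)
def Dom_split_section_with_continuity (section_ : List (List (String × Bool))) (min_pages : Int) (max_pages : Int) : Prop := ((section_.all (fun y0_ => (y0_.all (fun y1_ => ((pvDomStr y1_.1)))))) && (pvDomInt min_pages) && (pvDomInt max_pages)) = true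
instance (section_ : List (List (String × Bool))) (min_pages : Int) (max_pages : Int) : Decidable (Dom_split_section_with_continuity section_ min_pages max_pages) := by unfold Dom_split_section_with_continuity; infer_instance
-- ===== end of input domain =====

-- B replaces A's append-and-flush accumulator loop by a two-pointer chunk extractor (outer
-- start index, inner cut-point scan, chunks produced as slices); same O(n) cost, different
-- decomposition.

-- ===== PORT A =====
-- page['content_continued_from_previous_page'] at index k of the section; Python raises
-- (IndexError/KeyError) where the lookup is none — those inputs are excluded by Pre_ below,
-- the port defaults to false there.
def contA (section_ : List (List (String × Bool))) (k : Int) : Bool :=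
  (((PySem.List.pyGet? section_ k).bind
      (fun pg => PySem.Dict.get? (PySem.Dict.mk pg) "content_continued_from_previous_page"))).getD false

-- the for-loop of A over enumerate(section), state = (split_sections, current_split)
def loopA (section_ : List (List (String × Bool))) (max_pages : Int) :
    List (Int × List (String × Bool)) →
    (List (List (List (String × Bool))) × List (List (String × Bool))) →
    (List (List (List (String × Bool))) × List (List (String × Bool)))
  | [], st => st
  | (idx, page) :: rest, (acc, cur) =>
    let cur' := cur ++ [page]
    if (cur'.length : Int) ≥ max_pages then
      if idx + 1 < (section_.length : Int) ∧ contA section_ (idx + 1) = true then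
        loopA section_ max_pages rest (acc, cur')
      else
        loopA section_ max_pages rest (acc ++ [cur'], [])
    else
      loopA section_ max_pages rest (acc, cur')

def split_section_with_continuity (section_ : List (List (String × Bool))) (min_pages : Int) (max_pages : Int) : List (List (List (String × Bool))) :=
  let st := loopA section_ max_pages (PySem.List.enumerate section_ 0) ([], [])
  if st.2 ≠ [] then st.1 ++ [st.2] else st.1

-- ===== PORT B =====
def contB (section_ : List (List (String × Bool))) (k : Int) : Bool :=
  (((PySem.List.pyGet? section_ k).bind
      (fun pg => PySem.Dict.get? (PySem.Dict.mk pg) "content_continued_from_previous_page"))).getD false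

-- B's inner while: advance j to the cut point of the chunk starting at i
def findJ (section_ : List (List (String × Bool))) (max_pages : Int) (i j : Nat) : Nat :=
  if j + 1 < section_.length then
    if (j : Int) - (i : Int) + 1 ≥ max_pages ∧ contB section_ ((j : Int) + 1) = false then j
    else findJ section_ max_pages i (j + 1)
  else j
termination_by section_.length - j

-- B's outer while: emit the slice section[i:j+1], restart at j+1
theorem le_findJ (section_ : List (List (String × Bool))) (max_pages : Int) (i j : Nat) :
    j ≤ findJ section_ max_pages i j := by
  unfold findJ
  split
  · split
    · exact le_refl j
    · exact le_trans (Nat.le_succ j) (le_findJ section_ max_pages i (j + 1))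
  · exact le_refl j
termination_by section_.length - j

def outerB (section_ : List (List (String × Bool))) (max_pages : Int) (i : Nat) : List (List (List (String × Bool))) :=
  if h : i < section_.length then
    let j := findJ section_ max_pages i i
    PySem.List.slice section_ (some (i : Int)) (some ((j : Int) + 1)) ::
      outerB section_ max_pages (j + 1)
  else []
termination_by section_.length - i
decreasing_by
  have := le_findJ section_ max_pages i i
  omega

def split_section_with_continuity_alt (section_ : List (List (String × Bool))) (min_pages : Int) (max_pages : Int) : List (List (List (String × Bool))) :=
  outerB section_ max_pages 0

-- ===== PRECONDITION & SPEC =====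
-- Pre_ excludes the inputs on which Python A raises KeyError/IndexError: whenever the section is
-- longer than max_pages, A may read 'content_continued_from_previous_page' from pages after the
-- first, so those pages must carry the key. This is slightly coarser than A's exact raise set
-- (a page at a position A never inspects may lack the key while A still returns — see the cite).
def Pre_split_section_with_continuity (section_ : List (List (String × Bool))) (min_pages : Int) (max_pages : Int) : Prop :=
  (section_.length : Int) ≤ max_pages ∨
    ∀ pg ∈ section_.drop 1, (PySem.Dict.get? (PySem.Dict.mk pg) "content_continued_from_previous_page").isSome = true
instance (section_ : List (List (String × Bool))) (min_pages : Int) (max_pages : Int) : Decidable (Pre_split_section_with_continuity section_ min_pages max_pages) := by unfold Pre_split_section_with_continuity; infer_instance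

def pvWitness_split_section_with_continuity : (List (List (String × Bool))) × Int × Int :=
  ([[("content_continued_from_previous_page", false)],
    [("content_continued_from_previous_page", true)],
    [("content_continued_from_previous_page", false)]], 1, 1)

def Spec_split_section_with_continuity (section_ : List (List (String × Bool))) (min_pages : Int) (max_pages : Int) (out : List (List (List (String × Bool)))) : Prop := out = split_section_with_continuity_alt section_ min_pages max_pages
instance (section_ : List (List (String × Bool))) (min_pages : Int) (max_pages : Int) (out : List (List (List (String × Bool)))) : Decidable (Spec_split_section_with_continuity section_ min_pages max_pages out) := by unfold Spec_split_section_with_continuity; infer_instance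

-- ===== CLAIM (what is proved, stated in full; the proofs are below) =====
def Claim_equal_split_section_with_continuity : Prop := ∀ (section_ : List (List (String × Bool))) (min_pages : Int) (max_pages : Int), Dom_split_section_with_continuity section_ min_pages max_pages → Pre_split_section_with_continuity section_ min_pages max_pages → Spec_split_section_with_continuity section_ min_pages max_pages (split_section_with_continuity section_ min_pages max_pages)

-- ===== LEMMAS AND PROOFS =====
-- (the equality in fact holds for all inputs; Pre_ is carried because Python A raises outside it)

-- mid-level reference function: A's remaining computation from page index i with pending chunk cur
def resA (section_ : List (List (String × Bool))) (max_pages : Int) (i : Nat) (cur : List (List (String × Bool))) : List (List (List (String × Bool))) :=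
  if h : i < section_.length then
    let cur' := cur ++ [section_[i]]
    if (cur'.length : Int) ≥ max_pages then
      if (i : Int) + 1 < (section_.length : Int) ∧ contA section_ ((i : Int) + 1) = true then
        resA section_ max_pages (i + 1) cur'
      else
        cur' :: resA section_ max_pages (i + 1) []
    else
      resA section_ max_pages (i + 1) cur'
  else if cur ≠ [] then [cur] else []
termination_by section_.length - i

theorem contB_eq_contA (section_ : List (List (String × Bool))) (k : Int) :
    contB section_ k = contA section_ k := rfl

-- A's loop over the enumerated suffix equals resA
theorem loopA_eq_resA (section_ : List (List (String × Bool))) (max_pages : Int) :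
    ∀ (l : List (List (String × Bool))) (i : Nat)
      (acc : List (List (List (String × Bool)))) (cur : List (List (String × Bool))),
      section_.drop i = l →
      (let st := loopA section_ max_pages (PySem.List.enumerate l (i : Int)) (acc, cur)
       if st.2 ≠ [] then st.1 ++ [st.2] else st.1) = acc ++ resA section_ max_pages i cur := by
  intro l
  induction l with
  | nil =>
    intro i acc cur hdrop
    have hi : section_.length ≤ i := by
      have := congrArg List.length hdrop
      simp at this
      omega
    rw [resA]
    simp only [PySem.List.enumerate, loopA]
    by_cases hc : cur = []
    · simp [hc, dif_neg (by omega : ¬ i < section_.length)]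
    · simp [hc, dif_neg (by omega : ¬ i < section_.length)]
  | cons p rest ih =>
    intro i acc cur hdrop
    have hi : i < section_.length := by
      by_contra h
      rw [List.drop_eq_nil_of_le (by omega)] at hdrop
      simp at hdrop
    have hd2 : section_[i] :: section_.drop (i + 1) = p :: rest := by
      rw [← List.drop_eq_getElem_cons hi, hdrop]
    have hp : section_[i] = p := (List.cons.inj hd2).1
    have hrest : section_.drop (i + 1) = rest := (List.cons.inj hd2).2
    rw [PySem.List.enumerate_cons, resA]
    simp only [dif_pos hi, loopA, hp]
    have hcast : (i : Int) + 1 = ((i + 1 : Nat) : Int) := by push_cast; ring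
    by_cases hsz : ((cur ++ [p]).length : Int) ≥ max_pages
    · by_cases hcont : (i : Int) + 1 < (section_.length : Int) ∧ contA section_ ((i : Int) + 1) = true
      · rw [if_pos hsz, if_pos hcont, if_pos hsz, if_pos hcont, hcast]
        exact ih (i + 1) acc (cur ++ [p]) hrest
      · rw [if_pos hsz, if_neg hcont, if_pos hsz, if_neg hcont, hcast]
        rw [ih (i + 1) (acc ++ [cur ++ [p]]) [] hrest]
        simp
    · rw [if_neg hsz, if_neg hsz, hcast]
      exact ih (i + 1) acc (cur ++ [p]) hrest

theorem findJ_lt (section_ : List (List (String × Bool))) (max_pages : Int) (i j : Nat)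
    (hj : j < section_.length) : findJ section_ max_pages i j < section_.length := by
  unfold findJ
  split
  · split
    · exact hj
    · exact findJ_lt section_ max_pages i (j + 1) (by omega)
  · exact hj
termination_by section_.length - j

-- bridge: resA from j with pending cur (a chunk started at i = j - cur.length) produces the
-- chunk ending at findJ i j, then restarts empty
theorem resA_bridge (section_ : List (List (String × Bool))) (max_pages : Int) :
    ∀ (j i : Nat) (cur : List (List (String × Bool))),
      j < section_.length → i + cur.length = j →
      resA section_ max_pages j cur =
        (cur ++ (section_.drop j).take (findJ section_ max_pages i j + 1 - j)) ::
          resA section_ max_pages (findJ section_ max_pages i j + 1) [] := by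
  intro j
  induction hn : section_.length - j using Nat.strong_induction_on generalizing j with
  | _ n ihn =>
  intro i cur hj hij
  rw [resA]
  simp only [dif_pos hj]
  have hsz : (((cur ++ [section_[j]]).length : Nat) : Int) = (j : Int) - (i : Int) + 1 := by
    simp; omega
  have hdropj : section_.drop j = section_[j] :: section_.drop (j + 1) :=
    List.drop_eq_getElem_cons hj
  by_cases hcut : ((cur ++ [section_[j]]).length : Int) ≥ max_pages
  · by_cases hnext : (j : Int) + 1 < (section_.length : Int) ∧ contA section_ ((j : Int) + 1) = true
    · -- continue accumulating
      rw [if_pos hcut, if_pos hnext]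
      have hj1 : j + 1 < section_.length := by exact_mod_cast hnext.1
      have hfind : findJ section_ max_pages i j = findJ section_ max_pages i (j + 1) := by
        rw [findJ, if_pos hj1, if_neg]
        intro ⟨_, hc⟩
        rw [contB_eq_contA] at hc
        rw [hnext.2] at hc
        exact Bool.noConfusion hc
      have hge := le_findJ section_ max_pages i (j + 1)
      rw [hfind]
      rw [ihn (section_.length - (j + 1)) (by omega) (j + 1) rfl i (cur ++ [section_[j]]) hj1 (by simp; omega)]
      congr 1
      rw [hdropj]
      have h1 : findJ section_ max_pages i (j + 1) + 1 - j
          = (findJ section_ max_pages i (j + 1) + 1 - (j + 1)) + 1 := by omega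
      rw [h1, List.take_succ_cons]
      simp
    · -- cut here
      rw [if_pos hcut, if_neg hnext]
      have hfind : findJ section_ max_pages i j = j := by
        rw [findJ]
        by_cases hj1 : j + 1 < section_.length
        · rw [if_pos hj1, if_pos]
          constructor
          · omega
          · rw [contB_eq_contA]
            by_cases hc : contA section_ ((j : Int) + 1) = true
            · exact absurd ⟨by exact_mod_cast hj1, hc⟩ hnext
            · simpa using hc
        · rw [if_neg hj1]
      rw [hfind]
      have h1 : List.take (j + 1 - j) (List.drop j section_) = [section_[j]] := by
        rw [hdropj]
        have h2 : j + 1 - j = 1 := by omega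
        rw [h2]
        rfl
      rw [h1]
  · -- chunk not yet full
    rw [if_neg hcut]
    by_cases hj1 : j + 1 < section_.length
    · have hfind : findJ section_ max_pages i j = findJ section_ max_pages i (j + 1) := by
        rw [findJ, if_pos hj1, if_neg]
        intro ⟨hc, _⟩
        rw [← hsz] at hc
        exact hcut hc
      have hge := le_findJ section_ max_pages i (j + 1)
      rw [hfind]
      rw [ihn (section_.length - (j + 1)) (by omega) (j + 1) rfl i (cur ++ [section_[j]]) hj1 (by simp; omega)]
      congr 1
      rw [hdropj]
      have h1 : findJ section_ max_pages i (j + 1) + 1 - j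
          = (findJ section_ max_pages i (j + 1) + 1 - (j + 1)) + 1 := by omega
      rw [h1, List.take_succ_cons]
      simp
    · -- last page: flush
      have hlen : section_.length = j + 1 := by omega
      have hfind : findJ section_ max_pages i j = j := by rw [findJ, if_neg hj1]
      rw [hfind]
      rw [resA]
      simp only [dif_neg (by omega : ¬ j + 1 < section_.length)]
      rw [resA]
      simp only [dif_neg (by omega : ¬ j + 1 < section_.length)]
      have h2 : j + 1 - j = 1 := by omega
      rw [h2]
      simp
      rw [hdropj]
      rfl

-- resA on an empty pending chunk is B's outer loop
theorem resA_eq_outerB (section_ : List (List (String × Bool))) (max_pages : Int) :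
    ∀ (i : Nat), resA section_ max_pages i [] = outerB section_ max_pages i := by
  intro i
  induction hn : section_.length - i using Nat.strong_induction_on generalizing i with
  | _ n ihn =>
  by_cases hi : i < section_.length
  · have hge := le_findJ section_ max_pages i i
    have hlt := findJ_lt section_ max_pages i i hi
    rw [resA_bridge section_ max_pages i i [] hi (by simp)]
    rw [outerB]
    simp only [dif_pos hi]
    congr 1
    · have : ((i : Int) + 1 : Int) = (((i : Nat) + 1 : Nat) : Int) := by push_cast; ring
      rw [show ((findJ section_ max_pages i i : Int) + 1)
            = ((findJ section_ max_pages i i + 1 : Nat) : Int) by push_cast; ring]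
      rw [PySem.List.slice_natCast]
      simp
    · exact ihn (section_.length - (findJ section_ max_pages i i + 1)) (by omega) _ rfl
  · rw [resA, outerB]
    simp [dif_neg hi]

-- ===== VERDICT (by name: the statement is the Claim_ definition above) =====
theorem split_section_with_continuity_spec : Claim_equal_split_section_with_continuity := by
  intro section_ min_pages max_pages _ _
  unfold Spec_split_section_with_continuity split_section_with_continuity split_section_with_continuity_alt
  have h := loopA_eq_resA section_ max_pages section_ 0 [] [] (by simp)
  simp only [Nat.cast_zero] at h
  rw [h]
  simp [resA_eq_outerB]
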